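-- pv_equiv track=rewrite | github.com/uwplse/herbgrind | src/include/mk-mathreplace.py | complexArgsList
-- ===== SOURCE A (Python) =====
-- def complexArgsList(i, argsString):
--     if i == 1:
--         return "{0}[0] + {0}[1] * I".format(argsString)
--     elif i == 2:
--         return "{0}, {1}[2] + {1}[3] * I"\
--             .format(complexArgsList(1, argsString), argsString)
--     elif i == 3:
--         return "{0}, {1}[4] + {1}[5] * I"\
--             .format(complexArgsList(2, argsString), argsString)
-- ===== SOURCE B (Python) =====
-- def complexArgsList(i, argsString):
--     if i not in (1, 2, 3):
--         return None
--     terms = ["{0}[{1}] + {0}[{2}] * I".format(argsString, 2 * j, 2 * j + 1)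
--              for j in range(i)]
--     return ", ".join(terms)
-- ===== Notes on version B (the rewrite author's own statement) =====
-- stated objective: simpler
-- what changed: Replaces the chain of recursive calls unwinding one level per argument with a single guarded comprehension that formats each term from the closed-form index pattern (2j, 2j+1) and joins them with ', '.
import Mathlib
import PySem

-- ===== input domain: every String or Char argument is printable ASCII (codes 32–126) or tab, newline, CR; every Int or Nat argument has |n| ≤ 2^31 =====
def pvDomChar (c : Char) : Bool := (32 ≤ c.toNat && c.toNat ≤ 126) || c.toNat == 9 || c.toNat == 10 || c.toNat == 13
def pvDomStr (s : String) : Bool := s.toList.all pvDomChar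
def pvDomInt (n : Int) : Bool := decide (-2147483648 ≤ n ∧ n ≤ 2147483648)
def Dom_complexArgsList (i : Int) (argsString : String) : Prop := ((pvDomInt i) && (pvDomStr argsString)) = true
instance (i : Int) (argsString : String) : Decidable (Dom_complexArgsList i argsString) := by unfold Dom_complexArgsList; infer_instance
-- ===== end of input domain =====

-- B replaces A's per-argument recursion by one guarded comprehension over the closed-form
-- index pattern (2j, 2j+1), joined with ", " (objective: simpler).

-- ===== PORT A =====
-- literal transliteration of A's recursion; the recursive call always yields `some` in the
-- reachable cases, so the `none` match arm is never taken.
def complexArgsList (i : Int) (argsString : String) : Option String :=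
  if _h1 : i == 1 then
    some (argsString ++ "[0] + " ++ argsString ++ "[1] * I")
  else if _h2 : i == 2 then
    match complexArgsList 1 argsString with
    | some s => some (s ++ ", " ++ argsString ++ "[2] + " ++ argsString ++ "[3] * I")
    | none => none
  else if _h3 : i == 3 then
    match complexArgsList 2 argsString with
    | some s => some (s ++ ", " ++ argsString ++ "[4] + " ++ argsString ++ "[5] * I")
    | none => none
  else
    none
termination_by i.toNat
decreasing_by
  · simp at _h2; omega
  · simp at _h3; omega

-- ===== PORT B =====
def complexArgsList_alt (i : Int) (argsString : String) : Option String :=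
  if i ≠ 1 ∧ i ≠ 2 ∧ i ≠ 3 then
    none
  else
    some (PySem.Str.join ", "
      ((List.range i.toNat).map fun j =>
        argsString ++ "[" ++ PySem.Int.toStr (2 * (j : Int)) ++ "] + " ++
          argsString ++ "[" ++ PySem.Int.toStr (2 * (j : Int) + 1) ++ "] * I"))

-- ===== PRECONDITION & SPEC =====
def Spec_complexArgsList (i : Int) (argsString : String) (out : Option String) : Prop := out = complexArgsList_alt i argsString
instance (i : Int) (argsString : String) (out : Option String) : Decidable (Spec_complexArgsList i argsString out) := by unfold Spec_complexArgsList; infer_instance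

-- ===== CLAIM (what is proved, stated in full; the proofs are below) =====
def Claim_equal_complexArgsList : Prop := ∀ (i : Int) (argsString : String), Dom_complexArgsList i argsString → Spec_complexArgsList i argsString (complexArgsList i argsString)

-- ===== LEMMAS AND PROOFS =====

theorem alt_one (s : String) : complexArgsList_alt 1 s =
    some (s ++ "[0] + " ++ s ++ "[1] * I") := by
  have e0 : PySem.Int.toStr 0 = "0" := by decide
  have e1 : PySem.Int.toStr 1 = "1" := by decide
  simp [complexArgsList_alt, List.range_succ, PySem.Str.join, e0, e1]
  rw [String.ext_iff]; simp [PySem.Chars.join_cons_cons, PySem.Chars.join_singleton]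

theorem alt_two (s : String) : complexArgsList_alt 2 s =
    some (s ++ "[0] + " ++ s ++ "[1] * I" ++ ", " ++ s ++ "[2] + " ++ s ++ "[3] * I") := by
  have e0 : PySem.Int.toStr 0 = "0" := by decide
  have e1 : PySem.Int.toStr 1 = "1" := by decide
  have e2 : PySem.Int.toStr 2 = "2" := by decide
  have e3 : PySem.Int.toStr 3 = "3" := by decide
  simp [complexArgsList_alt, List.range_succ, PySem.Str.join, e0, e1, e2, e3]
  rw [String.ext_iff]; simp [PySem.Chars.join_cons_cons, PySem.Chars.join_singleton]

theorem alt_three (s : String) : complexArgsList_alt 3 s =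
    some (s ++ "[0] + " ++ s ++ "[1] * I" ++ ", " ++ s ++ "[2] + " ++ s ++ "[3] * I" ++ ", " ++ s ++ "[4] + " ++ s ++ "[5] * I") := by
  have e0 : PySem.Int.toStr 0 = "0" := by decide
  have e1 : PySem.Int.toStr 1 = "1" := by decide
  have e2 : PySem.Int.toStr 2 = "2" := by decide
  have e3 : PySem.Int.toStr 3 = "3" := by decide
  have e4 : PySem.Int.toStr 4 = "4" := by decide
  have e5 : PySem.Int.toStr 5 = "5" := by decide
  simp [complexArgsList_alt, List.range_succ, PySem.Str.join, e0, e1, e2, e3, e4, e5]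
  rw [String.ext_iff]; simp [PySem.Chars.join_cons_cons, PySem.Chars.join_singleton]

-- ===== VERDICT (by name: the statement is the Claim_ definition above) =====
theorem complexArgsList_spec : Claim_equal_complexArgsList := by
  intro i s _
  unfold Spec_complexArgsList
  by_cases h1 : i = 1
  · subst h1; rw [alt_one]; simp [complexArgsList]
  · by_cases h2 : i = 2
    · subst h2; rw [alt_two]; simp [complexArgsList]
    · by_cases h3 : i = 3
      · subst h3; rw [alt_three]; simp [complexArgsList]
      · simp [complexArgsList, complexArgsList_alt, h1, h2, h3]
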